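-- pv_equiv track=rewrite | github.com/Pigaju/Robot-Tour | logs/plot_runs.py | segment_rows
-- ===== SOURCE A (Python) =====
-- def segment_rows(rows):
--     """Split rows into segments by detecting large time gaps (>500ms)."""
--     if not rows:
--         return []
--     segments = [[rows[0]]]
--     for i in range(1, len(rows)):
--         if rows[i]['t_ms'] - rows[i-1]['t_ms'] > 500:
--             segments.append([])
--         segments[-1].append(rows[i])
--     return segments
-- ===== SOURCE B (Python) =====
-- def segment_rows(rows):
--     """Split rows into segments by detecting large time gaps (>500ms)."""
--     if not rows:
--         return []
--     cuts = [i for i in range(1, len(rows))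
--             if rows[i]['t_ms'] - rows[i-1]['t_ms'] > 500]
--     boundaries = [0] + cuts + [len(rows)]
--     return [rows[a:b] for a, b in zip(boundaries, boundaries[1:])]
-- ===== Notes on version B (the rewrite author's own statement) =====
-- stated objective: alternative
-- what changed: Replaces the incremental append-to-last-segment loop by a two-phase find-cut-indices-then-slice decomposition: first collect the gap positions, then form a boundary table and slice the row list between consecutive boundaries.
import Mathlib
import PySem

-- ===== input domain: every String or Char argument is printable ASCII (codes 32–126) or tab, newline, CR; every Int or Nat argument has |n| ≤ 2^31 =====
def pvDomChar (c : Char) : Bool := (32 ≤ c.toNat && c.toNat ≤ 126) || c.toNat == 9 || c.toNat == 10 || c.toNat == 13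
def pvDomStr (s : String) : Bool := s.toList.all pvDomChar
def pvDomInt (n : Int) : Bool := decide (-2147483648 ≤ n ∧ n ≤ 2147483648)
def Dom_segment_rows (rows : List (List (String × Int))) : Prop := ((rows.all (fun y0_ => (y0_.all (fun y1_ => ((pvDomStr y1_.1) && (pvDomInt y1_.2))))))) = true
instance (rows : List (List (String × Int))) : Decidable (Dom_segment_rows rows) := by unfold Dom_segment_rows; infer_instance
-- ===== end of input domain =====

-- B replaces the incremental append-to-last-segment loop by a find-cut-indices-then-slice decomposition (objective: alternative; same cost).

-- shared helpers: dict lookup rows[i]['t_ms'] (first match in the association list; Pre_ guarantees the key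
-- is present wherever Python looks it up, so the .getD 0 default is never the value used) and the gap test
def tms (r : List (String × Int)) : Int := ((r.find? (fun p => p.1 == "t_ms")).map Prod.snd).getD 0

def gap (rows : List (List (String × Int))) (i : Int) : Bool :=
  decide (tms (PySem.List.pyGetD rows i []) - tms (PySem.List.pyGetD rows (i - 1) []) > 500)

-- ===== PORT A =====
-- segments[-1].append(r): append r to the last segment
def appendLast (segs : List (List (List (String × Int)))) (r : List (String × Int)) :
    List (List (List (String × Int))) :=
  match segs with
  | [] => []
  | [s] => [s ++ [r]]
  | s :: t :: rest => s :: appendLast (t :: rest) r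

def segment_rows (rows : List (List (String × Int))) : List (List (List (String × Int))) :=
  match rows with
  | [] => []
  | r0 :: _ =>
    (PySem.List.pyRange 1 (PySem.List.len rows) 1).foldl
      (fun segs i =>
        appendLast (if gap rows i then segs ++ [[]] else segs) (PySem.List.pyGetD rows i []))
      [[r0]]

-- ===== PORT B =====
def segment_rows_alt (rows : List (List (String × Int))) : List (List (List (String × Int))) :=
  match rows with
  | [] => []
  | _ :: _ =>
    let cuts := (PySem.List.pyRange 1 (PySem.List.len rows) 1).filter (gap rows)
    let boundaries := 0 :: cuts ++ [PySem.List.len rows]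
    (boundaries.zip boundaries.tail).map (fun ab => PySem.List.slice rows (some ab.1) (some ab.2))

-- ===== PRECONDITION & SPEC =====
-- Pre_ excludes exactly the inputs where Python A raises KeyError: with at least two rows,
-- every row must contain the key "t_ms" (with 0 or 1 rows the key is never looked up).
def Pre_segment_rows (rows : List (List (String × Int))) : Prop :=
  2 ≤ rows.length → ∀ r ∈ rows, (r.any (fun p => p.1 == "t_ms")) = true
instance (rows : List (List (String × Int))) : Decidable (Pre_segment_rows rows) := by
  unfold Pre_segment_rows; infer_instance

def pvWitness_segment_rows : (List (List (String × Int))) :=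
  [[("t_ms", 0)], [("t_ms", 800)], [("t_ms", 900)]]

def Spec_segment_rows (rows : List (List (String × Int))) (out : List (List (List (String × Int)))) : Prop := out = segment_rows_alt rows
instance (rows : List (List (String × Int))) (out : List (List (List (String × Int)))) : Decidable (Spec_segment_rows rows out) := by unfold Spec_segment_rows; infer_instance

-- ===== CLAIM (what is proved, stated in full; the proofs are below) =====
def Claim_equal_segment_rows : Prop := ∀ (rows : List (List (String × Int))), Dom_segment_rows rows → Pre_segment_rows rows → Spec_segment_rows rows (segment_rows rows)

-- ===== LEMMAS AND PROOFS =====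

-- B's result cut off at boundary m: boundaries restricted to cuts below m, final boundary m
def bnds (rows : List (List (String × Int))) (m : Int) : List Int :=
  0 :: (PySem.List.pyRange 1 m 1).filter (gap rows) ++ [m]

def segsUpto (rows : List (List (String × Int))) (m : Int) : List (List (List (String × Int))) :=
  ((bnds rows m).zip (bnds rows m).tail).map (fun ab => PySem.List.slice rows (some ab.1) (some ab.2))

lemma appendLast_append (xs : List (List (List (String × Int)))) (s : List (List (String × Int)))
    (r : List (String × Int)) : appendLast (xs ++ [s]) r = xs ++ [s ++ [r]] := by
  induction xs with
  | nil => rfl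
  | cons x xs ih =>
    cases xs with
    | nil => rfl
    | cons y ys => simpa [appendLast] using ih

lemma pairs_append (a y : Int) (l : List Int) :
    ((a :: l) ++ [y]).zip (l ++ [y]) = ((a :: l).zip l) ++ [(l.getLastD a, y)] := by
  induction l generalizing a with
  | nil => rfl
  | cons b t ih =>
    rw [List.getLastD_cons]
    simpa using congrArg (List.cons (a, b)) (ih b)

lemma slice_snoc (rows : List (List (String × Int))) (c m : Int)
    (hc : 0 ≤ c) (hcm : c ≤ m) (hm : m < PySem.List.len rows) :
    PySem.List.slice rows (some c) (some m) ++ [PySem.List.pyGetD rows m []] =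
      PySem.List.slice rows (some c) (some (m + 1)) := by
  obtain ⟨cn, rfl⟩ : ∃ k : Nat, c = (k : Int) := ⟨c.toNat, (Int.toNat_of_nonneg hc).symm⟩
  obtain ⟨mn, rfl⟩ : ∃ k : Nat, m = (k : Int) := ⟨m.toNat, (Int.toNat_of_nonneg (hc.trans hcm)).symm⟩
  have hcm' : cn ≤ mn := by exact_mod_cast hcm
  have hm' : mn < rows.length := by simpa [PySem.List.len] using hm
  rw [show ((mn : Int) + 1) = ((mn + 1 : Nat) : Int) by push_cast; ring]
  rw [PySem.List.slice_natCast, PySem.List.slice_natCast, PySem.List.pyGetD_natCast]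
  have hdrop : mn - cn < (rows.drop cn).length := by simp [List.length_drop]; omega
  rw [show mn + 1 - cn = (mn - cn) + 1 by omega, List.take_add_one,
    List.getElem?_eq_getElem hdrop]
  simp [List.getElem_drop, show cn + (mn - cn) = mn by omega,
    List.getD_eq_getElem?_getD, List.getElem?_eq_getElem hm']

lemma slice_single (rows : List (List (String × Int))) (m : Int)
    (hm0 : 0 ≤ m) (hm : m < PySem.List.len rows) :
    PySem.List.slice rows (some m) (some (m + 1)) = [PySem.List.pyGetD rows m []] := by
  have h := slice_snoc rows m m hm0 le_rfl hm
  rw [← h]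
  obtain ⟨mn, rfl⟩ : ∃ k : Nat, m = (k : Int) := ⟨m.toNat, (Int.toNat_of_nonneg hm0).symm⟩
  simp [PySem.List.slice_natCast]

lemma getLastD_le_of_cuts (rows : List (List (String × Int))) (m : Int) (h1 : 1 ≤ m) :
    0 ≤ ((PySem.List.pyRange 1 m 1).filter (gap rows)).getLastD 0 ∧
      ((PySem.List.pyRange 1 m 1).filter (gap rows)).getLastD 0 ≤ m := by
  cases he : (PySem.List.pyRange 1 m 1).filter (gap rows) with
  | nil => refine ⟨le_rfl, ?_⟩; simp; omega
  | cons x t =>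
    have hmem : (x :: t).getLastD 0 ∈ x :: t := by
      rw [List.getLastD_eq_getLast?, List.getLast?_eq_some_getLast (by simp)]
      exact List.getLast_mem _
    rw [← he] at hmem
    have h2 := (List.mem_filter.mp hmem).1
    have h3 := (PySem.List.mem_pyRange_one).mp h2
    rw [he] at h3
    constructor <;> omega

lemma step_segs (rows : List (List (String × Int))) (m : Int)
    (h1 : 1 ≤ m) (h2 : m < PySem.List.len rows) :
    appendLast (if gap rows m then segsUpto rows m ++ [[]] else segsUpto rows m)
      (PySem.List.pyGetD rows m []) = segsUpto rows (m + 1) := by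
  obtain ⟨hge0, hlem⟩ := getLastD_le_of_cuts rows m h1
  cases hg : gap rows m with
  | true =>
    have hcuts : (PySem.List.pyRange 1 (m + 1) 1).filter (gap rows) =
        (PySem.List.pyRange 1 m 1).filter (gap rows) ++ [m] := by
      rw [PySem.List.pyRange_one_succ_right h1, List.filter_append]
      simp [List.filter, hg]
    rw [if_pos rfl, appendLast_append]
    unfold segsUpto bnds
    rw [hcuts,
      show (((0:Int) :: ((PySem.List.pyRange 1 m 1).filter (gap rows) ++ [m])) ++ [m + 1]).tail
        = ((PySem.List.pyRange 1 m 1).filter (gap rows) ++ [m]) ++ [m + 1] from rfl,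
      pairs_append 0 (m + 1) ((PySem.List.pyRange 1 m 1).filter (gap rows) ++ [m]),
      List.getLastD_concat, List.map_append]
    simp [List.cons_append, slice_single rows m (by omega) h2]
  | false =>
    have hcuts : (PySem.List.pyRange 1 (m + 1) 1).filter (gap rows) =
        (PySem.List.pyRange 1 m 1).filter (gap rows) := by
      rw [PySem.List.pyRange_one_succ_right h1, List.filter_append]
      simp [List.filter, hg]
    rw [if_neg Bool.false_ne_true]
    unfold segsUpto bnds
    rw [hcuts,
      show (((0:Int) :: (PySem.List.pyRange 1 m 1).filter (gap rows)) ++ [m]).tail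
        = (PySem.List.pyRange 1 m 1).filter (gap rows) ++ [m] from rfl,
      show (((0:Int) :: (PySem.List.pyRange 1 m 1).filter (gap rows)) ++ [m + 1]).tail
        = (PySem.List.pyRange 1 m 1).filter (gap rows) ++ [m + 1] from rfl,
      pairs_append 0 m ((PySem.List.pyRange 1 m 1).filter (gap rows)),
      pairs_append 0 (m + 1) ((PySem.List.pyRange 1 m 1).filter (gap rows)),
      List.map_append, List.map_append]
    simp only [List.map_cons, List.map_nil]
    rw [appendLast_append, slice_snoc rows _ m hge0 hlem h2]

lemma foldl_segs (rows : List (List (String × Int))) (hne : rows ≠ []) (k : Nat)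
    (hk : 1 + (k : Int) ≤ PySem.List.len rows) :
    (PySem.List.pyRange 1 (1 + (k : Int)) 1).foldl
      (fun segs i =>
        appendLast (if gap rows i then segs ++ [[]] else segs) (PySem.List.pyGetD rows i []))
      [[rows.headI]] = segsUpto rows (1 + (k : Int)) := by
  induction k with
  | zero =>
    rw [show (1 + ((0 : Nat) : Int)) = 1 by norm_num, PySem.List.pyRange_one_eq_nil le_rfl]
    have hsl : PySem.List.slice rows (some (0:Int)) (some (1:Int)) = rows.take 1 := by
      rw [show ((0:Int)) = ((0:Nat):Int) from rfl, show ((1:Int)) = ((1:Nat):Int) from rfl,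
        PySem.List.slice_natCast]
      simp
    simp only [List.foldl_nil, segsUpto, bnds, PySem.List.pyRange_one_eq_nil le_rfl,
      List.filter_nil]
    cases rows with
    | nil => exact absurd rfl hne
    | cons r t => simp_all
  | succ n ih =>
    have h1 : (1 : Int) ≤ 1 + (n : Int) := by omega
    rw [show (1 + ((n + 1 : Nat) : Int)) = (1 + (n : Int)) + 1 by push_cast; ring,
      PySem.List.pyRange_one_succ_right h1, List.foldl_append,
      ih (by push_cast at hk ⊢; omega), List.foldl_cons, List.foldl_nil]
    exact step_segs rows (1 + (n : Int)) h1 (by push_cast at hk ⊢; omega)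

-- ===== VERDICT (by name: the statement is the Claim_ definition above) =====
theorem segment_rows_spec : Claim_equal_segment_rows := by
  intro rows _ _
  unfold Spec_segment_rows
  cases rows with
  | nil => rfl
  | cons r0 rest =>
    have hlen : PySem.List.len (r0 :: rest) = 1 + (rest.length : Int) := by
      simp [PySem.List.len]; ring
    have hfold := foldl_segs (r0 :: rest) (by simp) rest.length (by rw [hlen])
    simp only [List.headI] at hfold
    show segment_rows (r0 :: rest) = segment_rows_alt (r0 :: rest)
    rw [segment_rows, segment_rows_alt]
    simp only [hlen]
    rw [hfold]
    rfl
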